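-- pv_equiv track=rewrite | github.com/joselado/pyqula | src/pyqula/specialgeometry.py | multilayer_codes
-- ===== SOURCE A (Python) =====
-- def multilayer_codes(n=3):
--     """Return all the codes for aligned multilayers
--     up to n layers"""
--     out = []
--     import itertools
--     for i in range(n): # loop over layer numbers
--         o = list(itertools.product('ABC', repeat=i))
--         o = ["A"+"".join(io) for io in o]
--         out += o
--     return out
-- ===== SOURCE B (Python) =====
-- def multilayer_codes(n=3):
--     out = []
--     suffixes = ['']
--     for _ in range(n):
--         out += ['A' + s for s in suffixes]
--         suffixes = [s + c for s in suffixes for c in 'ABC']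
--     return out
-- ===== Notes on version B (the rewrite author's own statement) =====
-- stated objective: alternative
-- what changed: Builds each layer's suffix list incrementally from the previous layer's strings (a single running-state loop) instead of regenerating the full itertools.product of characters independently for every layer.
import Mathlib
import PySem

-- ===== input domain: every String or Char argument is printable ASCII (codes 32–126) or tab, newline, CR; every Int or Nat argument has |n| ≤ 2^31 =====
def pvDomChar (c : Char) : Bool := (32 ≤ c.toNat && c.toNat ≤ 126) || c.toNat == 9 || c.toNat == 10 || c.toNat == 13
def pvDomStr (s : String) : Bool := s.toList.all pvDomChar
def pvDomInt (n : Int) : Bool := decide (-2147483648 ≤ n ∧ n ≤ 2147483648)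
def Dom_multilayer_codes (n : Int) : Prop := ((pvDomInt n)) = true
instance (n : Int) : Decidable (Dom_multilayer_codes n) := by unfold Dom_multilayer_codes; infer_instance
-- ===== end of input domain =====

-- B builds each layer's suffixes incrementally from the previous layer instead of
-- regenerating the full character product per layer (alternative decomposition, same cost).

-- ===== PORT A =====
-- itertools.product('ABC', repeat=i) in its order: first component varies slowest
def pvProd : Nat → List (List Char)
  | 0 => [[]]
  | i + 1 => ['A', 'B', 'C'].flatMap (fun c => (pvProd i).map (fun w => c :: w))

def multilayer_codes (n : Int) : List String :=
  (PySem.List.pyRange 0 n 1).foldl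
    (fun out i => out ++ (pvProd i.toNat).map (fun io => "A" ++ String.ofList io)) []

-- ===== PORT B =====
-- loop body: out += ['A'+s for s in suffixes]; suffixes = [s+c for s in suffixes for c in 'ABC']
def pvAltLoop : Nat → List String → List String → List String
  | 0, out, _ => out
  | k + 1, out, sufs =>
      pvAltLoop k (out ++ sufs.map (fun s => "A" ++ s))
        (sufs.flatMap (fun s => ['A', 'B', 'C'].map (fun c => s.push c)))

def multilayer_codes_alt (n : Int) : List String :=
  pvAltLoop n.toNat [] [""]

-- ===== PRECONDITION & SPEC =====
def Spec_multilayer_codes (n : Int) (out : List String) : Prop := out = multilayer_codes_alt n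
instance (n : Int) (out : List String) : Decidable (Spec_multilayer_codes n out) := by unfold Spec_multilayer_codes; infer_instance

-- ===== CLAIM (what is proved, stated in full; the proofs are below) =====
def Claim_equal_multilayer_codes : Prop := ∀ (n : Int), Dom_multilayer_codes n → Spec_multilayer_codes n (multilayer_codes n)

-- ===== LEMMAS AND PROOFS =====

theorem pvPush_ofList (a : List Char) (c : Char) :
    (String.ofList a).push c = String.ofList (a ++ [c]) := by
  apply String.toList_injective
  simp

-- prepend-style product can also be generated append-style (last character varies fastest)
theorem pvProd_succ (n : Nat) :
    pvProd (n + 1) = (pvProd n).flatMap (fun w => ['A', 'B', 'C'].map (fun c => w ++ [c])) := by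
  induction n with
  | zero => decide
  | succ n ih =>
      show ['A','B','C'].flatMap (fun c => (pvProd (n+1)).map (fun w => c :: w)) = _
      conv_lhs => rw [ih]
      rw [pvProd]
      simp [List.map_flatMap, List.flatMap_map]

theorem pvAltLoop_eq (k : Nat) : ∀ (j : Nat) (out : List String),
    pvAltLoop k out ((pvProd j).map String.ofList)
      = out ++ (List.range k).flatMap (fun t => (pvProd (j + t)).map (fun w => "A" ++ String.ofList w)) := by
  induction k with
  | zero => intro j out; simp [pvAltLoop]
  | succ k ih =>
      intro j out
      have hsuf : ((pvProd j).map String.ofList).flatMap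
            (fun s => ['A','B','C'].map (fun c => s.push c))
          = (pvProd (j + 1)).map String.ofList := by
        rw [pvProd_succ]
        simp [List.map_flatMap, List.flatMap_map, pvPush_ofList]
      have harith : ∀ t : Nat, j + 1 + t = j + (t + 1) := fun t => by omega
      rw [pvAltLoop, hsuf, ih (j + 1), List.range_succ_eq_map]
      simp [List.map_map, List.flatMap_map, Function.comp_def, List.append_assoc, harith]

theorem multilayer_codes_eq (n : Int) :
    multilayer_codes n
      = (List.range n.toNat).flatMap (fun i => (pvProd i).map (fun w => "A" ++ String.ofList w)) := by
  unfold multilayer_codes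
  rw [PySem.List.pyRange_one, PySem.List.foldl_append_eq_flatMap]
  simp [List.flatMap_map]

theorem multilayer_codes_alt_eq (n : Int) :
    multilayer_codes_alt n
      = (List.range n.toNat).flatMap (fun i => (pvProd i).map (fun w => "A" ++ String.ofList w)) := by
  unfold multilayer_codes_alt
  have h : ([""] : List String) = (pvProd 0).map String.ofList := by
    simp [pvProd]
  rw [h, pvAltLoop_eq n.toNat 0]
  simp

-- ===== VERDICT (by name: the statement is the Claim_ definition above) =====
theorem multilayer_codes_spec : Claim_equal_multilayer_codes := by
  intro n _
  unfold Spec_multilayer_codes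
  rw [multilayer_codes_eq, multilayer_codes_alt_eq]
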